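-- pv_equiv track=rewrite | github.com/JoongWonChoi/CodingtestPractice | Greedy(탐욕법)/Greedy_큰 수의 법칙(이코테).py | bigNum2
-- ===== SOURCE A (Python) =====
-- def bigNum2(n,m,k,num):
--     answer = 0
--     num.sort(reverse = True) #num배열 내림차순 정렬
--     while True:
--         for i in range(k): #한 수에 대해 k회까지 반복 제어
--             if m==0:break #총 더하는 횟수(m)가 끝나면 반복 종료
--             answer += num[0] #m이 0이 아니라면 가장 큰수 k회만큼 덧셈 반복
--             m-=1 #더해지는 횟수 1 차감
--         if m==0:break #k회 반복 후 총 더하는 남여 횟수가 없으면 반복 종료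
--         answer += num[1] #그렇지 않으면 두번쨰로 큰 수 한번 더하기(휴게소)
--         m-=1 #더해지는 횟수 1 차감 후 반복
--     return answer
-- ===== SOURCE B (Python) =====
-- def bigNum2(n, m, k, num):
--     s = sorted(num, reverse=True)
--     cnt_max = (m // (k + 1)) * k + m % (k + 1)
--     return cnt_max * s[0] + (m - cnt_max) * s[1]
-- ===== Notes on version B (the rewrite author's own statement) =====
-- stated objective: simpler
-- what changed: B replaces A's element-by-element while/for addition loop by a closed-form count of how many times the largest element is added (full cycles of k+1 plus remainder), leaving only sorting and O(1) arithmetic.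
-- outside the precondition, e.g. on bigNum2(2, 3, -2, [5, 4]): A returns 12, B returns 18; on bigNum2(1, 2, 3, [5]): A returns 10, B raises IndexError; on bigNum2(1, 0, 2, []): A returns 0, B raises IndexError
import Mathlib
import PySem

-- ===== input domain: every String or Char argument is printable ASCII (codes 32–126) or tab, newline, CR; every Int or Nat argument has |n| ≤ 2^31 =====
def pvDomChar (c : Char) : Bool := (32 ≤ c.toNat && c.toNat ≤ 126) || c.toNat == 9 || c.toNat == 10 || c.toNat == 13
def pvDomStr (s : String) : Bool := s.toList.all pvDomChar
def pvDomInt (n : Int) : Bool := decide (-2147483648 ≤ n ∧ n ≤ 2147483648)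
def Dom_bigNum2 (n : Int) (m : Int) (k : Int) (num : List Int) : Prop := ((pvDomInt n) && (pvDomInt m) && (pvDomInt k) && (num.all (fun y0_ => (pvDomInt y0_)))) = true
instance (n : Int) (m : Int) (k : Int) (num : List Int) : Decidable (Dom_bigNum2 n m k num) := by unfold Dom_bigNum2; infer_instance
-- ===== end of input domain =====

-- B computes the number of additions of the largest element in closed form (full cycles of k+1
-- plus remainder) instead of A's per-addition while/for loop; equivalence is about the RETURN
-- value only (Python A sorts `num` in place, B leaves it untouched).


-- ===== PORT A =====
-- inner `for i in range(k)`: one step per remaining range index, `break` = early return when m == 0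
def bigNum2For (numS : List Int) (answer : Int) (m : Int) : Nat → Int × Int
  | 0 => (answer, m)
  | t + 1 =>
    if m = 0 then (answer, m)
    else bigNum2For numS (answer + PySem.List.pyGetD numS 0 0) (m - 1) t

-- outer `while True`; fuel m.toNat+1 suffices because m decreases every non-final iteration
-- (Python diverges for m < 0; Pre_ excludes that)
def bigNum2Loop (numS : List Int) (k : Int) : Nat → Int → Int → Int
  | 0, answer, _ => answer
  | fuel+1, answer, m =>
    let st := bigNum2For numS answer m k.toNat
    if st.2 = 0 then st.1
    else bigNum2Loop numS k fuel (st.1 + PySem.List.pyGetD numS 1 0) (st.2 - 1)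

def bigNum2 (n : Int) (m : Int) (k : Int) (num : List Int) : Int :=
  let numS := PySem.List.sorted num (fun x => x) true
  bigNum2Loop numS k (m.toNat + 1) 0 m

-- ===== PORT B =====
def bigNum2_alt (n : Int) (m : Int) (k : Int) (num : List Int) : Int :=
  let s := PySem.List.sorted num (fun x => x) true
  let cntMax := (PySem.Int.floordiv m (k + 1)) * k + PySem.Int.mod m (k + 1)
  cntMax * PySem.List.pyGetD s 0 0 + (m - cntMax) * PySem.List.pyGetD s 1 0

-- ===== PRECONDITION & SPEC =====
-- Pre_ excludes m < 0 (A loops forever), k < 0 (a negative repeat count is outside the task's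
-- natural domain; A's value there is an accident of `range(k)` being empty and B's cycle formula
-- does not apply), and lists with fewer than 2 elements (B always reads the two largest elements
-- and raises IndexError, while A can return when m ≤ k or m = 0).
def Pre_bigNum2 (n : Int) (m : Int) (k : Int) (num : List Int) : Prop :=
  0 ≤ m ∧ 0 ≤ k ∧ 2 ≤ num.length
instance (n : Int) (m : Int) (k : Int) (num : List Int) : Decidable (Pre_bigNum2 n m k num) := by unfold Pre_bigNum2; infer_instance
def pvWitness_bigNum2 : Int × Int × Int × List Int := (5, 8, 3, [2, 4, 5, 4, 6])

def Spec_bigNum2 (n : Int) (m : Int) (k : Int) (num : List Int) (out : Int) : Prop := out = bigNum2_alt n m k num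
instance (n : Int) (m : Int) (k : Int) (num : List Int) (out : Int) : Decidable (Spec_bigNum2 n m k num out) := by unfold Spec_bigNum2; infer_instance

-- ===== CLAIM (what is proved, stated in full; the proofs are below) =====
def Claim_equal_bigNum2 : Prop := ∀ (n : Int) (m : Int) (k : Int) (num : List Int), Dom_bigNum2 n m k num → Pre_bigNum2 n m k num → Spec_bigNum2 n m k num (bigNum2 n m k num)

-- ===== LEMMAS AND PROOFS =====

-- the inner recursion over t remaining range indices adds min(m, t) copies of s[0]
lemma for_eq (s : List Int) (t : Nat) :
    ∀ (answer m : Int), 0 ≤ m →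
    bigNum2For s answer m t =
    if m < (t : Int) then (answer + m * PySem.List.pyGetD s 0 0, 0)
    else (answer + (t : Int) * PySem.List.pyGetD s 0 0, m - (t : Int)) := by
  induction t with
  | zero =>
    intro answer m hm
    rw [bigNum2For, if_neg (by push_cast; omega)]
    norm_num
  | succ t ih =>
    intro answer m hm
    rw [bigNum2For]
    by_cases h0 : m = 0
    · subst h0
      rw [if_pos rfl, if_pos (by push_cast; omega)]
      norm_num
    · rw [if_neg h0, ih _ (m - 1) (by omega)]
      by_cases hlt : m < ((t + 1 : Nat) : Int)
      · rw [if_pos (by push_cast at hlt ⊢; omega), if_pos hlt]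
        simp only [Prod.mk.injEq, and_true]
        ring
      · rw [if_neg (by push_cast at hlt ⊢; omega), if_neg hlt]
        simp only [Prod.mk.injEq]
        refine ⟨by push_cast; ring, by push_cast; ring⟩

-- the closed-form count of additions of the largest element
def cntMaxOf (k m : Int) : Int := (PySem.Int.floordiv m (k + 1)) * k + PySem.Int.mod m (k + 1)

lemma cntMax_small (k m : Int) (hk : 0 ≤ k) (hm : 0 ≤ m) (hmk : m ≤ k) : cntMaxOf k m = m := by
  unfold cntMaxOf
  rw [PySem.Int.floordiv_eq_ediv_of_pos (by omega : (0:Int) < k + 1),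
      PySem.Int.mod_eq_emod_of_pos (by omega : (0:Int) < k + 1)]
  have h1 : m / (k + 1) = 0 := Int.ediv_eq_zero_of_lt hm (by omega)
  have h2 : m % (k + 1) = m := Int.emod_eq_of_lt hm (by omega)
  rw [h1, h2]; ring

lemma cntMax_step (k m : Int) (hk : 0 ≤ k) (hmk : k < m) :
    cntMaxOf k m = k + cntMaxOf k (m - k - 1) := by
  unfold cntMaxOf
  rw [PySem.Int.floordiv_eq_ediv_of_pos (by omega : (0:Int) < k + 1),
      PySem.Int.mod_eq_emod_of_pos (by omega : (0:Int) < k + 1),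
      PySem.Int.floordiv_eq_ediv_of_pos (by omega : (0:Int) < k + 1),
      PySem.Int.mod_eq_emod_of_pos (by omega : (0:Int) < k + 1)]
  have hrep : m = (m - k - 1) + 1 * (k + 1) := by ring
  have hdiv : m / (k + 1) = (m - k - 1) / (k + 1) + 1 := by
    conv_lhs => rw [hrep]
    rw [Int.add_mul_ediv_right _ _ (by omega : (k:Int) + 1 ≠ 0)]
  have hmod : m % (k + 1) = (m - k - 1) % (k + 1) := by
    conv_lhs => rw [hrep]
    rw [Int.add_mul_emod_self_right]
  rw [hdiv, hmod]
  ring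

lemma loop_eq (s : List Int) (k : Int) (hk : 0 ≤ k) :
    ∀ (fuel : Nat) (m answer : Int), 0 ≤ m → m < (fuel : Int) →
    bigNum2Loop s k fuel answer m =
      answer + cntMaxOf k m * PySem.List.pyGetD s 0 0
             + (m - cntMaxOf k m) * PySem.List.pyGetD s 1 0 := by
  intro fuel
  induction fuel with
  | zero => intro m answer hm hf; exfalso; push_cast at hf; omega
  | succ fuel ih =>
    intro m answer hm hf
    have hkk : ((k.toNat : Nat) : Int) = k := by omega
    rw [bigNum2Loop]
    rw [for_eq s k.toNat answer m hm, hkk]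
    by_cases hmk : m < k
    · simp only [if_pos hmk]
      norm_num
      rw [cntMax_small k m hk hm (by omega)]
      ring
    · simp only [if_neg hmk]
      by_cases hz : m - k = 0
      · simp only [if_pos hz]
        have hmk' : m = k := by omega
        rw [cntMax_small k m hk hm (by omega), hmk']
        ring
      · simp only [if_neg hz]
        have hk' : k < m := by omega
        have hrec := ih (m - k - 1) (answer + k * PySem.List.pyGetD s 0 0 + PySem.List.pyGetD s 1 0)
          (by omega) (by push_cast at hf ⊢; omega)
        rw [hrec, cntMax_step k m hk hk']
        ring

-- ===== VERDICT (by name: the statement is the Claim_ definition above) =====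
theorem bigNum2_spec : Claim_equal_bigNum2 := by
  intro n m k num _hdom hpre
  obtain ⟨hm, hk, _hlen⟩ := hpre
  unfold Spec_bigNum2 bigNum2 bigNum2_alt
  rw [loop_eq _ k hk (m.toNat + 1) m 0 hm (by push_cast; omega)]
  show 0 + cntMaxOf k m * _ + (m - cntMaxOf k m) * _ = _
  unfold cntMaxOf
  ring
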